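-- pv_equiv track=rewrite | github.com/circlethepi/musicmodels | moparser.py | strip_ties
-- ===== SOURCE A (Python) =====
-- def strip_ties(abc):
--     ret = []
--     tied = False
--
--     for c in abc:
--         if c == '-':
--             tied = True
--         elif c in 'ABCDEFGabcdefg' and tied:
--             tied = False
--         elif tied:
--             continue
--         else:
--             ret.append(c)
--
--     return ''.join(ret)
-- ===== SOURCE B (Python) =====
-- def strip_ties(abc):
--     # Split on '-': the first segment is kept whole; in each later segment the
--     # tie is active, so drop everything up to and including its first note letter.
--     head, *rest = abc.split('-')
--     pieces = [head]
--     for seg in rest: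
--         i = next((k for k, ch in enumerate(seg) if ch in 'ABCDEFGabcdefg'), len(seg))
--         pieces.append(seg[i + 1:])
--     return ''.join(pieces)
-- ===== Notes on version B (the rewrite author's own statement) =====
-- stated objective: idiomatic
-- what changed: Replaces the character-by-character scan with a mutable tie flag by a declarative split on the dash separator followed by dropping each later segment's prefix up to and including its first note letter.
import Mathlib
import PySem

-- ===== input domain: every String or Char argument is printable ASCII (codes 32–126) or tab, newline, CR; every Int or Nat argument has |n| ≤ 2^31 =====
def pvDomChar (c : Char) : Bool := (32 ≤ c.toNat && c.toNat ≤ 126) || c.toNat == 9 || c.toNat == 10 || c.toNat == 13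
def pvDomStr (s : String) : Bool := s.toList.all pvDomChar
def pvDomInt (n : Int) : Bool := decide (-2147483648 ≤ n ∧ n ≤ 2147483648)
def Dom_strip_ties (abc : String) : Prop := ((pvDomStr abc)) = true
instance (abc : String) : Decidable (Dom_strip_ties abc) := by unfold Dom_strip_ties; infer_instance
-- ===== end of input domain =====

-- B replaces A's stateful flag-scan by split-on-'-' plus a per-segment prefix drop (idiomatic, same cost).

-- ===== PORT A =====
-- c in 'ABCDEFGabcdefg' (single-char membership in a literal ASCII string; shared by both ports)
def isNoteChar (c : Char) : Bool := "ABCDEFGabcdefg".toList.contains c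

-- one loop iteration: state (ret, tied); ret.append(c) = ret ++ [c]
def stepA (st : List Char × Bool) (c : Char) : List Char × Bool :=
  if c = '-' then (st.1, true)
  else if isNoteChar c && st.2 then (st.1, false)
  else if st.2 then st
  else (st.1 ++ [c], st.2)

def strip_ties (abc : String) : String :=
  let st := abc.toList.foldl stepA ([], false)
  String.mk st.1

-- ===== PORT B =====
-- abc.split('-') for the single-character separator '-' (hand port, exact: each '-'
-- is a cut point, adjacent dashes yield empty segments, split of '' is ['']).
def splitDash : List Char → List (List Char)
  | [] => [[]]
  | c :: cs =>
    if c = '-' then [] :: splitDash cs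
    else
      match splitDash cs with
      | [] => [[c]]        -- unreachable: splitDash never returns []
      | h :: t => (c :: h) :: t

-- seg[i+1:] with i = first index of a note letter, default len(seg)
-- (List.findIdx returns the length when no element matches, exactly the default)
def stripSeg (seg : List Char) : List Char := seg.drop (seg.findIdx isNoteChar + 1)

def strip_ties_alt (abc : String) : String :=
  match splitDash abc.toList with
  | [] => ""               -- unreachable: splitDash never returns []
  | head :: rest => String.mk (head ++ (rest.map stripSeg).flatten)

-- ===== PRECONDITION & SPEC =====
def Spec_strip_ties (abc : String) (out : String) : Prop := out = strip_ties_alt abc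
instance (abc : String) (out : String) : Decidable (Spec_strip_ties abc out) := by unfold Spec_strip_ties; infer_instance

-- ===== CLAIM (what is proved, stated in full; the proofs are below) =====
def Claim_equal_strip_ties : Prop := ∀ (abc : String), Dom_strip_ties abc → Spec_strip_ties abc (strip_ties abc)

-- ===== LEMMAS AND PROOFS =====

-- the recursion computed by A's loop (output only; the flag is the second argument)
def goA : List Char → Bool → List Char
  | [], _ => []
  | c :: cs, tied =>
    if c = '-' then goA cs true
    else if isNoteChar c && tied then goA cs false
    else if tied then goA cs tied
    else c :: goA cs tied

theorem foldl_eq_goA (cs : List Char) (acc : List Char) (tied : Bool) :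
    (cs.foldl stepA (acc, tied)).1 = acc ++ goA cs tied := by
  induction cs generalizing acc tied with
  | nil => simp [goA]
  | cons c cs ih =>
    by_cases h1 : c = '-'
    · rw [List.foldl_cons, show stepA (acc, tied) c = (acc, true) by simp [stepA, h1]]
      simp [goA, h1, ih]
    · by_cases h2 : isNoteChar c && tied
      · have ht : tied = true := by revert h2; cases tied <;> simp
        rw [List.foldl_cons, show stepA (acc, tied) c = (acc, false) by simp [stepA, h1, h2]]
        simp only [ih, goA]
        rw [if_neg h1, if_pos h2]
      · by_cases h3 : tied = true
        · have hn : isNoteChar c = false := by revert h2; rw [h3]; cases isNoteChar c <;> simp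
          rw [List.foldl_cons, show stepA (acc, tied) c = (acc, tied) by simp [stepA, h1, h3, hn]]
          simp only [ih, goA]
          rw [if_neg h1, if_neg h2, if_pos h3]
        · rw [List.foldl_cons,
            show stepA (acc, tied) c = (acc ++ [c], tied) by simp [stepA, h1, h3]]
          simp only [ih, goA]
          rw [if_neg h1, if_neg h2, if_neg h3]
          simp

theorem splitDash_ne_nil (cs : List Char) : splitDash cs ≠ [] := by
  cases cs with
  | nil => simp [splitDash]
  | cons c cs =>
    simp only [splitDash]
    split
    · simp
    · cases h : splitDash cs <;> simp

theorem goA_splitDash (cs : List Char) (tied : Bool) :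
    goA cs tied =
      match splitDash cs with
      | [] => []
      | h :: t => (if tied then stripSeg h else h) ++ (t.map stripSeg).flatten := by
  induction cs generalizing tied with
  | nil => cases tied <;> simp [goA, splitDash, stripSeg]
  | cons c cs ih =>
    rcases hs : splitDash cs with _ | ⟨h, t⟩
    · exact absurd hs (splitDash_ne_nil cs)
    by_cases h1 : c = '-'
    · have hsplit : splitDash (c :: cs) = [] :: h :: t := by simp [splitDash, h1, hs]
      rw [show goA (c :: cs) tied = goA cs true by simp [goA, h1], ih true, hs, hsplit]
      cases tied <;> simp [stripSeg]
    · have hsplit : splitDash (c :: cs) = (c :: h) :: t := by simp [splitDash, h1, hs]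
      by_cases hn : isNoteChar c = true
      · cases tied with
        | false =>
          rw [show goA (c :: cs) false = c :: goA cs false by simp [goA, h1], ih false, hs, hsplit]
          simp
        | true =>
          rw [show goA (c :: cs) true = goA cs false by simp [goA, h1, hn], ih false, hs, hsplit]
          have hseg : stripSeg (c :: h) = h := by
            simp [stripSeg, List.findIdx_cons, hn]
          simp [hseg]
      · cases tied with
        | false =>
          rw [show goA (c :: cs) false = c :: goA cs false by simp [goA, h1], ih false, hs, hsplit]
          simp
        | true =>
          rw [show goA (c :: cs) true = goA cs true by simp [goA, h1, hn], ih true, hs, hsplit]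
          have hseg : stripSeg (c :: h) = stripSeg h := by
            simp [stripSeg, List.findIdx_cons, hn]
          simp [hseg]

-- ===== VERDICT (by name: the statement is the Claim_ definition above) =====
theorem strip_ties_spec : Claim_equal_strip_ties := by
  intro abc _
  unfold Spec_strip_ties strip_ties strip_ties_alt
  have h1 := foldl_eq_goA abc.toList [] false
  have h2 := goA_splitDash abc.toList false
  rcases hs : splitDash abc.toList with _ | ⟨h, t⟩
  · exact absurd hs (splitDash_ne_nil abc.toList)
  · simp only [h1, h2, hs]
    simp
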